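-- pv_equiv track=rewrite | github.com/Rudra426/kavaach | main.py | platform_to_enc
-- ===== SOURCE A (Python) =====
-- PLATFORM_ENC = {"pharmeasy": 0, "netmeds": 1, "tata1mg": 2, "apollo24x7": 3, "phonepe": 4}
--
-- def platform_to_enc(platforms: list) -> int:
--     priority = {"phonepe": 4, "apollo24x7": 3, "tata1mg": 2, "netmeds": 1, "pharmeasy": 0}
--     best = max(
--         [p.lower() for p in platforms],
--         key=lambda p: priority.get(p, 0),
--         default="pharmeasy"
--     )
--     return PLATFORM_ENC.get(best, 0)
-- ===== SOURCE B (Python) =====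
-- PLATFORM_ENC = {"pharmeasy": 0, "netmeds": 1, "tata1mg": 2, "apollo24x7": 3, "phonepe": 4}
--
-- def platform_to_enc(platforms: list) -> int:
--     seen = {p.lower() for p in platforms}
--     for code, name in ((4, "phonepe"), (3, "apollo24x7"), (2, "tata1mg"), (1, "netmeds")):
--         if name in seen:
--             return code
--     return 0
-- ===== Notes on version B (the rewrite author's own statement) =====
-- stated objective: alternative
-- what changed: B builds a set of the lowered inputs once and scans the fixed priority table from highest to lowest, returning the first encoding whose name is present (0 otherwise), instead of selecting the max-priority string from the input list and re-encoding it.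
import Mathlib
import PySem

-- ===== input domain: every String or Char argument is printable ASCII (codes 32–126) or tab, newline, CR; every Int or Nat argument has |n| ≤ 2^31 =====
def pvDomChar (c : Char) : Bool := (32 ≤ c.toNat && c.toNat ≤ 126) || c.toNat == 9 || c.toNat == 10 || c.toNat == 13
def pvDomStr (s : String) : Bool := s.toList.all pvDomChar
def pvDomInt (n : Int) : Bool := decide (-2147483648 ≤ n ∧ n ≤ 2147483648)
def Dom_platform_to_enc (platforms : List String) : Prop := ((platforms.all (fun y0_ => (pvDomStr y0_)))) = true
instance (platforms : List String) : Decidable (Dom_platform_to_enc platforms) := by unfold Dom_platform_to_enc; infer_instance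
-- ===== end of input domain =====

-- B builds a set of the lowered inputs once and scans the fixed priority table from highest
-- to lowest, returning the first encoding present, instead of selecting the max-priority
-- string from the input and re-encoding it (objective: alternative).


-- ===== PORT A =====
-- module constant PLATFORM_ENC
def PLATFORM_ENC : PySem.Dict String Int :=
  PySem.Dict.ofList [("pharmeasy", 0), ("netmeds", 1), ("tata1mg", 2), ("apollo24x7", 3), ("phonepe", 4)]

def platform_to_enc (platforms : List String) : Int :=
  let priority : PySem.Dict String Int :=
    PySem.Dict.ofList [("phonepe", 4), ("apollo24x7", 3), ("tata1mg", 2), ("netmeds", 1), ("pharmeasy", 0)]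
  let best := PySem.List.maxD (platforms.map PySem.Str.lower) (fun p => priority.getD p 0) "pharmeasy"
  PLATFORM_ENC.getD best 0

-- ===== PORT B =====
-- the 'for code, name in (…): if name in seen: return code' loop, early return as recursion
def pteLoop (seen : PySem.Set String) : List (Int × String) → Int
  | [] => 0
  | (code, name) :: rest => if name ∈ seen then code else pteLoop seen rest

def platform_to_enc_alt (platforms : List String) : Int :=
  let seen : PySem.Set String := PySem.Set.ofList (platforms.map PySem.Str.lower)
  pteLoop seen [(4, "phonepe"), (3, "apollo24x7"), (2, "tata1mg"), (1, "netmeds")]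

-- ===== PRECONDITION & SPEC =====
def Spec_platform_to_enc (platforms : List String) (out : Int) : Prop := out = platform_to_enc_alt platforms
instance (platforms : List String) (out : Int) : Decidable (Spec_platform_to_enc platforms out) := by unfold Spec_platform_to_enc; infer_instance

-- ===== CLAIM (what is proved, stated in full; the proofs are below) =====
def Claim_equal_platform_to_enc : Prop := ∀ (platforms : List String), Dom_platform_to_enc platforms → Spec_platform_to_enc platforms (platform_to_enc platforms)

-- ===== LEMMAS AND PROOFS =====

-- the if-chain both sides compute: B literally, A as the maximum of the encodings
def pteChain (L : List String) : Int :=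
  if "phonepe" ∈ L then 4 else if "apollo24x7" ∈ L then 3
  else if "tata1mg" ∈ L then 2 else if "netmeds" ∈ L then 1 else 0

theorem ofL_priority : (PySem.Dict.ofList [("phonepe", (4:Int)), ("apollo24x7", 3), ("tata1mg", 2), ("netmeds", 1), ("pharmeasy", 0)])
    = PySem.Dict.mk [("phonepe", (4:Int)), ("apollo24x7", 3), ("tata1mg", 2), ("netmeds", 1), ("pharmeasy", 0)] := by
  simp [PySem.Dict.ofList, PySem.Dict.update, PySem.Dict.insert, PySem.Dict.empty, PySem.Dict.contains]

theorem hEnc : PLATFORM_ENC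
    = PySem.Dict.mk [("pharmeasy", (0:Int)), ("netmeds", 1), ("tata1mg", 2), ("apollo24x7", 3), ("phonepe", 4)] := by
  unfold PLATFORM_ENC
  simp [PySem.Dict.ofList, PySem.Dict.update, PySem.Dict.insert, PySem.Dict.empty, PySem.Dict.contains]

-- total lookup of either dict (default 0) as an if-chain
theorem enc_val (p : String) :
    PLATFORM_ENC.getD p 0
      = (if p = "phonepe" then 4 else if p = "apollo24x7" then 3
         else if p = "tata1mg" then 2 else if p = "netmeds" then 1 else 0) := by
  rw [hEnc]
  by_cases h1 : p = "phonepe"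
  · subst h1; simp [PySem.Dict.getD_eq_get?_getD, PySem.Dict.get?_mk_cons]
  by_cases h2 : p = "apollo24x7"
  · subst h2; simp [PySem.Dict.getD_eq_get?_getD, PySem.Dict.get?_mk_cons]
  by_cases h3 : p = "tata1mg"
  · subst h3; simp [PySem.Dict.getD_eq_get?_getD, PySem.Dict.get?_mk_cons]
  by_cases h4 : p = "netmeds"
  · subst h4; simp [PySem.Dict.getD_eq_get?_getD, PySem.Dict.get?_mk_cons]
  by_cases h5 : p = "pharmeasy"
  · subst h5; simp [PySem.Dict.getD_eq_get?_getD, PySem.Dict.get?_mk_cons]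
  simp only [PySem.Dict.getD_eq_get?_getD, PySem.Dict.get?_mk_cons, beq_iff_eq,
    if_neg (fun e => h1 (Eq.symm e)), if_neg (fun e => h2 (Eq.symm e)), if_neg (fun e => h3 (Eq.symm e)),
    if_neg (fun e => h4 (Eq.symm e)), if_neg (fun e => h5 (Eq.symm e)),
    if_neg h1, if_neg h2, if_neg h3, if_neg h4]
  rw [show (PySem.Dict.mk ([] : List (String × Int))).get? p = none from rfl]
  simp

theorem priority_eq_enc (p : String) :
    (PySem.Dict.ofList [("phonepe", (4:Int)), ("apollo24x7", 3), ("tata1mg", 2), ("netmeds", 1), ("pharmeasy", 0)]).getD p 0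
      = PLATFORM_ENC.getD p 0 := by
  rw [ofL_priority, enc_val]
  by_cases h1 : p = "phonepe"
  · subst h1; simp [PySem.Dict.getD_eq_get?_getD, PySem.Dict.get?_mk_cons]
  by_cases h2 : p = "apollo24x7"
  · subst h2; simp [PySem.Dict.getD_eq_get?_getD, PySem.Dict.get?_mk_cons]
  by_cases h3 : p = "tata1mg"
  · subst h3; simp [PySem.Dict.getD_eq_get?_getD, PySem.Dict.get?_mk_cons]
  by_cases h4 : p = "netmeds"
  · subst h4; simp [PySem.Dict.getD_eq_get?_getD, PySem.Dict.get?_mk_cons]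
  by_cases h5 : p = "pharmeasy"
  · subst h5; simp [PySem.Dict.getD_eq_get?_getD, PySem.Dict.get?_mk_cons]
  simp only [PySem.Dict.getD_eq_get?_getD, PySem.Dict.get?_mk_cons, beq_iff_eq,
    if_neg (fun e => h1 (Eq.symm e)), if_neg (fun e => h2 (Eq.symm e)), if_neg (fun e => h3 (Eq.symm e)),
    if_neg (fun e => h4 (Eq.symm e)), if_neg (fun e => h5 (Eq.symm e)),
    if_neg h1, if_neg h2, if_neg h3, if_neg h4]
  rw [show (PySem.Dict.mk ([] : List (String × Int))).get? p = none from rfl]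
  simp

theorem chain_bounds (L : List String) : 0 ≤ pteChain L ∧ pteChain L ≤ 4 := by
  unfold pteChain; split_ifs <;> norm_num

theorem chain_cons (y : String) (t : List String) :
    pteChain (y :: t) = max (PLATFORM_ENC.getD y 0) (pteChain t) := by
  have hb := chain_bounds t
  rw [enc_val]; unfold pteChain
  by_cases h1 : y = "phonepe"
  · subst h1; simp; omega
  by_cases h2 : y = "apollo24x7"
  · subst h2
    simp only [List.mem_cons, h1, false_or, if_neg h1]
    by_cases hp : "phonepe" ∈ t <;> simp_all <;> omega
  by_cases h3 : y = "tata1mg"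
  · subst h3
    simp only [List.mem_cons, h1, h2, false_or, if_neg h1, if_neg h2]
    by_cases hp : "phonepe" ∈ t <;> by_cases ha : "apollo24x7" ∈ t <;> simp_all <;> omega
  by_cases h4 : y = "netmeds"
  · subst h4
    simp only [List.mem_cons, h1, h2, h3, false_or, if_neg h1, if_neg h2, if_neg h3]
    by_cases hp : "phonepe" ∈ t <;> by_cases ha : "apollo24x7" ∈ t <;>
      by_cases ht : "tata1mg" ∈ t <;> simp_all <;> omega
  · have n1 : "phonepe" ≠ y := fun e => h1 e.symm
    have n2 : "apollo24x7" ≠ y := fun e => h2 e.symm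
    have n3 : "tata1mg" ≠ y := fun e => h3 e.symm
    have n4 : "netmeds" ≠ y := fun e => h4 e.symm
    simp only [List.mem_cons, n1, n2, n3, n4, false_or, if_neg h1, if_neg h2, if_neg h3, if_neg h4]
    unfold pteChain at hb
    split_ifs at hb ⊢ <;> omega

-- A's fold-max of the encodings equals the if-chain
theorem foldmax_eq_chain (L : List String) (a : Int) (ha : 0 ≤ a) :
    L.foldl (fun acc x => max acc (PLATFORM_ENC.getD x 0)) a = max a (pteChain L) := by
  induction L generalizing a with
  | nil =>
    have : pteChain [] = 0 := by unfold pteChain; simp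
    simp [this, max_eq_left ha]
  | cons y t ih =>
    have hg : (0:Int) ≤ PLATFORM_ENC.getD y 0 := by rw [enc_val]; split_ifs <;> norm_num
    simp only [List.foldl_cons]
    rw [ih (max a (PLATFORM_ENC.getD y 0)) (le_trans ha (le_max_left _ _)),
        chain_cons, max_assoc]

theorem foldl_max_le (l : List String) (g : String → Int) (a M : Int)
    (ha : a ≤ M) (h : ∀ x ∈ l, g x ≤ M) :
    l.foldl (fun acc x => max acc (g x)) a ≤ M := by
  induction l generalizing a with
  | nil => simpa using ha
  | cons y t ih =>
    simp only [List.foldl_cons]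
    exact ih (max a (g y)) (max_le ha (h y (List.mem_cons_self)))
      (fun x hx => h x (List.mem_cons_of_mem y hx))

theorem enc_nonneg (p : String) : (0:Int) ≤ PLATFORM_ENC.getD p 0 := by
  rw [enc_val]; split_ifs <;> norm_num

theorem enc_pharmeasy : PLATFORM_ENC.getD "pharmeasy" 0 = 0 := by
  rw [enc_val]; simp

-- A equals the fold-max of the encodings of the lowered inputs
theorem A_eq_foldmax (platforms : List String) :
    platform_to_enc platforms
      = (platforms.map PySem.Str.lower).foldl (fun acc x => max acc (PLATFORM_ENC.getD x 0)) 0 := by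
  unfold platform_to_enc
  simp only [PySem.List.maxD]
  cases hm : PySem.List.max? (platforms.map PySem.Str.lower)
      (fun p => (PySem.Dict.ofList [("phonepe", (4:Int)), ("apollo24x7", 3), ("tata1mg", 2), ("netmeds", 1), ("pharmeasy", 0)]).getD p 0) with
  | none =>
    have hnil : platforms.map PySem.Str.lower = [] := (PySem.List.max?_eq_none_iff _ _).mp hm
    rw [hnil]
    simpa using enc_pharmeasy
  | some m =>
    simp only [Option.getD_some]
    have hmem : m ∈ platforms.map PySem.Str.lower := PySem.List.max?_mem hm
    have hmax := PySem.List.max?_isMax hm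
    have hub := PySem.List.le_foldl_max_int (platforms.map PySem.Str.lower)
      (fun p => PLATFORM_ENC.getD p 0) 0
    have le1 : PLATFORM_ENC.getD m 0
        ≤ (platforms.map PySem.Str.lower).foldl (fun acc x => max acc (PLATFORM_ENC.getD x 0)) 0 :=
      hub.2 m hmem
    have le2 : (platforms.map PySem.Str.lower).foldl (fun acc x => max acc (PLATFORM_ENC.getD x 0)) 0
        ≤ PLATFORM_ENC.getD m 0 := by
      refine foldl_max_le _ _ 0 _ (enc_nonneg m) ?_
      intro x hx
      have := hmax x hx
      simpa [priority_eq_enc] using this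
    exact le_antisymm le1 le2

-- B equals the if-chain
theorem B_eq_chain (platforms : List String) :
    platform_to_enc_alt platforms = pteChain (platforms.map PySem.Str.lower) := by
  unfold platform_to_enc_alt pteChain
  simp only [pteLoop, PySem.Set.mem_ofList]

theorem platform_to_enc_eq (platforms : List String) :
    platform_to_enc platforms = platform_to_enc_alt platforms := by
  rw [A_eq_foldmax, B_eq_chain, foldmax_eq_chain _ 0 le_rfl,
      max_eq_right (chain_bounds _).1]

-- ===== VERDICT (by name: the statement is the Claim_ definition above) =====
theorem platform_to_enc_spec : Claim_equal_platform_to_enc := by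
  intro platforms _
  exact platform_to_enc_eq platforms
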